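-- pv_equiv track=rewrite | github.com/trangiahuy8444/GraphPulse | experiments/graphpulse_pipeline/data.py | _subsequence_indices
-- ===== SOURCE A (Python) =====
-- from typing import Dict, List, Tuple
--
-- def _subsequence_indices(longer: List[int], shorter: List[int]) -> List[int]:
--     """
--     Find indices `idx` such that longer[idx[i]] == shorter[i] and idx is increasing.
--     Greedy subsequence match. Works when `shorter` is a subsequence of `longer`.
--     """
--     idx: List[int] = []
--     j = 0
--     for i, v in enumerate(longer):
--         if j >= len(shorter):
--             break
--         if v == shorter[j]:
--             idx.append(i)
--             j += 1
--     if j != len(shorter):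
--         raise ValueError(
--             "Could not align label subsequence (shorter is not a subsequence of longer). "
--             f"matched={j} expected={len(shorter)}"
--         )
--     return idx
-- ===== SOURCE B (Python) =====
-- from typing import Dict, List
--
-- def _subsequence_indices(longer: List[int], shorter: List[int]) -> List[int]:
--     """Two-phase alignment: first build an occurrence index (value -> ascending
--     list of positions in `longer`), then walk `shorter`, advancing a per-value
--     cursor past stale occurrences; the matching loop never scans `longer`."""
--     occ: Dict[int, List[int]] = {}
--     for i, v in enumerate(longer):
--         occ.setdefault(v, []).append(i)
--     cur: Dict[int, int] = dict.fromkeys(occ, 0)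
--     out: List[int] = []
--     pos = 0
--     for v in shorter:
--         lst = occ.get(v, [])
--         k = cur.get(v, 0)
--         while k < len(lst) and lst[k] < pos:
--             k += 1
--         if k == len(lst):
--             raise ValueError(
--                 "Could not align label subsequence (shorter is not a subsequence of longer). "
--                 f"matched={len(out)} expected={len(shorter)}"
--             )
--         out.append(lst[k])
--         pos = lst[k] + 1
--         cur[v] = k + 1
--     return out
-- ===== Notes on version B (the rewrite author's own statement) =====
-- stated objective: alternative
-- what changed: B replaces A's single scan of `longer` with a two-phase algorithm: a preprocessing pass builds an occurrence index mapping each value to the ascending list of its positions in `longer`, and the matching loop over `shorter` then consults only that index, advancing a per-value cursor past stale occurrences, so it never touches `longer` itself.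
import Mathlib
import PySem

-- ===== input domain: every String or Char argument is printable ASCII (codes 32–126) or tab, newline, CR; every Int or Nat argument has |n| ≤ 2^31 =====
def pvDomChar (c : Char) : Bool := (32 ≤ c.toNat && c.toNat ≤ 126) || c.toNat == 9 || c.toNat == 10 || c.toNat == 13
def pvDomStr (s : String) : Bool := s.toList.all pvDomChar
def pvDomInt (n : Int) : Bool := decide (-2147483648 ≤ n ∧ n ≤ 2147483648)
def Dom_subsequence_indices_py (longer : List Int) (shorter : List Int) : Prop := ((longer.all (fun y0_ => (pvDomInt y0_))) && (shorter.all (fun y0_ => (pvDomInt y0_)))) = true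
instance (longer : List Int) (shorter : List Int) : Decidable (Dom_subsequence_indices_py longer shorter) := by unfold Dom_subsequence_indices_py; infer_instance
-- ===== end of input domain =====

-- B is a two-phase re-implementation: it first builds an occurrence index
-- (value -> ascending list of positions in `longer`), then walks `shorter`
-- advancing per-value cursors through that index; same results as A.

-- ===== PORT A =====
-- state: (accumulated idx, j); the `break` returns the state as-is
def pvAGo (shorter : List Int) : List (Int × Int) → List Int → Nat → List Int × Nat
  | [], idx, j => (idx, j)
  | (i, v) :: rest, idx, j =>
    if shorter.length ≤ j then (idx, j)                 -- `break`
    else if v = shorter.getD j 0 then                   -- shorter[j], j in range here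
      pvAGo shorter rest (idx ++ [i]) (j + 1)
    else pvAGo shorter rest idx j

def subsequence_indices_py (longer : List Int) (shorter : List Int) : List Int :=
  let st := pvAGo shorter (PySem.List.enumerate longer 0) [] 0
  if st.2 = shorter.length then st.1
  else []                                               -- `raise ValueError` (excluded by Pre_)

-- ===== PORT B =====
-- phase 1: occ.setdefault(v, []).append(i) over enumerate(longer)  (= Dict.modify)
def pvBuildOcc : List (Int × Int) → PySem.Dict Int (List Int) → PySem.Dict Int (List Int)
  | [], d => d
  | (i, v) :: rest, d => pvBuildOcc rest (d.modify v [] (· ++ [i]))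

-- cur = dict.fromkeys(occ, 0)
def pvFromKeys : List Int → PySem.Dict Int Int → PySem.Dict Int Int
  | [], d => d
  | k :: rest, d => pvFromKeys rest (d.insert k 0)

-- `while k < len(lst) and lst[k] < pos: k += 1`
def pvAdvance (lst : List Int) (pos : Int) (k : Nat) : Nat :=
  if h : k < lst.length then
    if lst[k] < pos then pvAdvance lst pos (k + 1) else k
  else k
termination_by lst.length - k

-- the matching loop over `shorter`; the cursor dict holds nonnegative Python ints,
-- so `.toNat` of the looked-up cursor is exact
def pvBLoop (occ : PySem.Dict Int (List Int)) :
    List Int → PySem.Dict Int Int → Int → List Int → List Int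
  | [], _, _, out => out
  | v :: rest, cur, pos, out =>
    let lst := occ.getD v []
    let k := pvAdvance lst pos (cur.getD v 0).toNat
    if h : k < lst.length then
      pvBLoop occ rest (cur.insert v ((k : Int) + 1)) (lst[k] + 1) (out ++ [lst[k]])
    else out                                            -- `raise ValueError` (excluded by Pre_)

def subsequence_indices_py_alt (longer : List Int) (shorter : List Int) : List Int :=
  let occ := pvBuildOcc (PySem.List.enumerate longer 0) PySem.Dict.empty
  let cur := pvFromKeys occ.keys PySem.Dict.empty
  pvBLoop occ shorter cur 0 []

-- ===== PRECONDITION & SPEC =====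
-- Pre_ excludes exactly the inputs where A raises ValueError (shorter not a subsequence
-- of longer); B raises the same ValueError there.
def Pre_subsequence_indices_py (longer : List Int) (shorter : List Int) : Prop :=
  shorter.Sublist longer
instance (longer : List Int) (shorter : List Int) : Decidable (Pre_subsequence_indices_py longer shorter) := by unfold Pre_subsequence_indices_py; infer_instance

def pvWitness_subsequence_indices_py : List Int × List Int := ([1, 2, 3, 2], [2, 2])

def Spec_subsequence_indices_py (longer : List Int) (shorter : List Int) (out : List Int) : Prop := out = subsequence_indices_py_alt longer shorter
instance (longer : List Int) (shorter : List Int) (out : List Int) : Decidable (Spec_subsequence_indices_py longer shorter out) := by unfold Spec_subsequence_indices_py; infer_instance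

-- ===== CLAIM (what is proved, stated in full; the proofs are below) =====
def Claim_equal_subsequence_indices_py : Prop := ∀ (longer : List Int) (shorter : List Int), Dom_subsequence_indices_py longer shorter → Pre_subsequence_indices_py longer shorter → Spec_subsequence_indices_py longer shorter (subsequence_indices_py longer shorter)

-- ===== LEMMAS AND PROOFS =====

-- the canonical greedy matcher both ports are reduced to
def pvG : List Int → List Int → Int → Option (List Int)
  | _, [], _ => some []
  | [], _ :: _, _ => none
  | x :: xs, v :: vs, k =>
    if x = v then (pvG xs vs (k + 1)).map (fun l => k :: l)
    else pvG xs (v :: vs) (k + 1)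

-- proof-side mediator: greedy driven by `shorter` via index? on the remaining suffix
def pvBGo (longer : List Int) : List Int → Nat → List Int
  | [], _ => []
  | v :: rest, pos =>
    match PySem.List.index? (longer.drop pos) v with
    | some k => ((pos + k : Nat) : Int) :: pvBGo longer rest (pos + k + 1)
    | none => []

theorem pvG_total (xs vs : List Int) (h : vs.Sublist xs) (k : Int) :
    ∃ l, pvG xs vs k = some l := by
  induction xs generalizing vs k with
  | nil =>
    cases vs with
    | nil => exact ⟨[], rfl⟩
    | cons v vs' => simp at h
  | cons x xs ih =>
    cases vs with
    | nil => exact ⟨[], rfl⟩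
    | cons v vs' =>
      by_cases hx : x = v
      · subst hx
        have hsub : vs'.Sublist xs := by
          cases h with
          | cons _ h' => exact (List.sublist_cons_self x vs').trans h'
          | cons₂ _ h' => exact h'
        obtain ⟨l', hl'⟩ := ih vs' hsub (k + 1)
        exact ⟨k :: l', by simp [pvG, hl']⟩
      · have hsub : (v :: vs').Sublist xs := by
          cases h with
          | cons _ h' => exact h'
          | cons₂ _ h' => exact absurd rfl hx
        obtain ⟨l, hl⟩ := ih (v :: vs') hsub (k + 1)
        exact ⟨l, by simp [pvG, hx, hl]⟩

theorem pvAGo_of_pvG (shorter : List Int) (xs : List Int) (k : Int) (acc : List Int)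
    (j : Nat) (l : List Int) (hj : j ≤ shorter.length)
    (hg : pvG xs (shorter.drop j) k = some l) :
    pvAGo shorter (PySem.List.enumerate xs k) acc j = (acc ++ l, shorter.length) := by
  induction xs generalizing k acc j l with
  | nil =>
    have hdrop : shorter.drop j = [] := by
      cases hd : shorter.drop j with
      | nil => rfl
      | cons a t => rw [hd] at hg; simp [pvG] at hg
    have hlen : shorter.length ≤ j := by
      have := List.drop_eq_nil_iff.mp hdrop
      omega
    have hjl : j = shorter.length := le_antisymm hj hlen
    rw [hdrop] at hg
    simp [pvG] at hg
    simp [PySem.List.enumerate, pvAGo, hjl, ← hg]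
  | cons x xs ih =>
    rw [PySem.List.enumerate_cons]
    by_cases hjb : shorter.length ≤ j
    · have hjl : j = shorter.length := le_antisymm hj hjb
      have hdrop : shorter.drop j = [] := by simp [hjl]
      rw [hdrop] at hg
      simp [pvG] at hg
      simp [pvAGo, hjl, ← hg]
    · have hjlt : j < shorter.length := by omega
      have hdrop : shorter.drop j = shorter[j] :: shorter.drop (j + 1) :=
        List.drop_eq_getElem_cons hjlt
      have hget : shorter.getD j 0 = shorter[j] := List.getD_eq_getElem _ _ hjlt
      rw [hdrop] at hg
      by_cases hx : x = shorter[j]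
      · simp only [pvG, if_pos hx, Option.map_eq_some_iff] at hg
        obtain ⟨l', hl', rfl⟩ := hg
        have := ih (k + 1) (acc ++ [k]) (j + 1) l' (by omega) hl'
        simp only [pvAGo, if_neg hjb, hget, if_pos hx]
        rw [this]
        simp
      · simp only [pvG, if_neg hx] at hg
        have := ih (k + 1) acc j l hj (by rw [hdrop]; exact hg)
        simp only [pvAGo, if_neg hjb, hget, if_neg hx]
        exact this

theorem pvG_cons_some (xs : List Int) (v : Int) (vs : List Int) (k : Int) (l : List Int)
    (hg : pvG xs (v :: vs) k = some l) :
    ∃ (m : Nat) (l' : List Int), PySem.List.index? xs v = some m ∧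
      l = (k + m) :: l' ∧ pvG (xs.drop (m + 1)) vs (k + m + 1) = some l' := by
  induction xs generalizing k l with
  | nil => simp [pvG] at hg
  | cons x xs ih =>
    by_cases hx : x = v
    · subst hx
      simp only [pvG] at hg
      cases h' : pvG xs vs (k + 1) with
      | none => rw [h'] at hg; cases hg
      | some l' =>
        rw [h'] at hg
        simp at hg
        exact ⟨0, l', PySem.List.index?_cons_self _ _, by simp [← hg], by simpa using h'⟩
    · simp only [pvG, if_neg hx] at hg
      obtain ⟨m, l', hidx, hl, hg'⟩ := ih (k + 1) l hg
      refine ⟨m + 1, l', ?_, ?_, ?_⟩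
      · rw [PySem.List.index?_cons_of_ne _ hx, hidx]; rfl
      · rw [hl]; congr 1; push_cast; ring
      · rw [show (k + ↑(m + 1) + 1 : Int) = k + 1 + ↑m + 1 by push_cast; ring,
            show m + 1 + 1 = (m + 1) + 1 from rfl]
        exact hg'

theorem pvBGo_of_pvG (longer : List Int) (vs : List Int) (pos : Nat) (l : List Int)
    (hg : pvG (longer.drop pos) vs (pos : Int) = some l) :
    pvBGo longer vs pos = l := by
  induction vs generalizing pos l with
  | nil => simp [pvG] at hg; simp [pvBGo, ← hg]
  | cons v vs ih =>
    obtain ⟨m, l', hidx, hl, hg'⟩ := pvG_cons_some (longer.drop pos) v vs (pos : Int) l hg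
    have hdd : (longer.drop pos).drop (m + 1) = longer.drop (pos + m + 1) := by
      rw [List.drop_drop]; ring_nf
    rw [hdd] at hg'
    have hg'' : pvG (longer.drop (pos + m + 1)) vs ((pos + m + 1 : Nat) : Int) = some l' := by
      rw [show ((pos + m + 1 : Nat) : Int) = (pos : Int) + m + 1 by push_cast; ring]
      exact hg'
    have := ih (pos + m + 1) l' hg''
    simp only [pvBGo, hidx]
    rw [this, hl]
    push_cast
    ring_nf

-- ========== B-side reduction to pvBGo ==========

-- the occurrence list of value v in xs, positions starting at n
def pvOccFrom (v : Int) : List Int → Int → List Int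
  | [], _ => []
  | x :: xs, n => if x = v then n :: pvOccFrom v xs (n + 1) else pvOccFrom v xs (n + 1)

theorem pvBuildOcc_getD (v : Int) (xs : List Int) (n : Int) (d : PySem.Dict Int (List Int)) :
    (pvBuildOcc (PySem.List.enumerate xs n) d).getD v [] = d.getD v [] ++ pvOccFrom v xs n := by
  induction xs generalizing n d with
  | nil => simp [PySem.List.enumerate, pvBuildOcc, pvOccFrom]
  | cons x xs ih =>
    rw [PySem.List.enumerate_cons]
    show (pvBuildOcc (PySem.List.enumerate xs (n + 1)) (d.modify x [] (· ++ [n]))).getD v [] = _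
    rw [ih]
    by_cases hx : x = v
    · subst hx
      rw [PySem.Dict.getD_modify_self]
      simp [pvOccFrom]
    · rw [PySem.Dict.getD_modify_of_ne _ _ _ (Ne.symm hx)]
      simp [pvOccFrom, hx]

theorem pvFromKeys_getD (ks : List Int) (d : PySem.Dict Int Int)
    (h : ∀ w, d.getD w 0 = 0) (w : Int) : (pvFromKeys ks d).getD w 0 = 0 := by
  induction ks generalizing d with
  | nil => exact h w
  | cons k ks ih =>
    refine ih _ (fun w' => ?_)
    rw [PySem.Dict.getD_insert]
    split_ifs <;> simp [h]

theorem pvOccFrom_split (v : Int) (xs : List Int) (n : Int) (p : Nat) :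
    pvOccFrom v xs n = pvOccFrom v (xs.take p) n ++ pvOccFrom v (xs.drop p) (n + p) := by
  induction xs generalizing n p with
  | nil => simp [pvOccFrom]
  | cons x xs ih =>
    cases p with
    | zero => simp [pvOccFrom]
    | succ p =>
      simp only [List.take_succ_cons, List.drop_succ_cons]
      have := ih (n + 1) p
      by_cases hx : x = v
      · simp only [pvOccFrom, if_pos hx, this]
        rw [show n + 1 + (p : Int) = n + (p + 1 : Nat) by push_cast; ring]
        simp
      · simp only [pvOccFrom, if_neg hx, this]
        rw [show n + 1 + (p : Int) = n + (p + 1 : Nat) by push_cast; ring]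

theorem pvOccFrom_bounds (v : Int) (xs : List Int) (n : Int) :
    ∀ e ∈ pvOccFrom v xs n, n ≤ e ∧ e < n + xs.length := by
  induction xs generalizing n with
  | nil => simp [pvOccFrom]
  | cons x xs ih =>
    intro e he
    by_cases hx : x = v
    · simp only [pvOccFrom, if_pos hx, List.mem_cons] at he
      rcases he with rfl | he
      · simp only [List.length_cons]
        push_cast
        omega
      · have := ih (n + 1) e he
        simp only [List.length_cons]
        push_cast at this ⊢
        omega
    · have := ih (n + 1) e (by simpa [pvOccFrom, hx] using he)
      simp only [List.length_cons]
      push_cast at this ⊢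
      omega

theorem pvOccFrom_nil_of_not_mem (v : Int) (ys : List Int) (m : Int) (h : v ∉ ys) :
    pvOccFrom v ys m = [] := by
  induction ys generalizing m with
  | nil => rfl
  | cons y ys ih =>
    have hy : y ≠ v := fun he => h (he ▸ List.mem_cons_self)
    simp only [pvOccFrom, if_neg hy]
    exact ih _ (fun hm => h (List.mem_cons_of_mem _ hm))

theorem pvOccFrom_head? (v : Int) (ys : List Int) (m : Int) :
    (pvOccFrom v ys m).head? = (PySem.List.index? ys v).map (fun i => m + (i : Int)) := by
  induction ys generalizing m with
  | nil => simp [pvOccFrom, PySem.List.index?]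
  | cons y ys ih =>
    by_cases hy : y = v
    · subst hy
      rw [PySem.List.index?_cons_self]
      simp [pvOccFrom]
    · rw [PySem.List.index?_cons_of_ne _ hy]
      simp only [pvOccFrom, if_neg hy, ih (m + 1)]
      cases PySem.List.index? ys v <;> simp
      ring

theorem pvAdvance_split (L1 L2 : List Int) (pos : Int)
    (h1 : ∀ e ∈ L1, e < pos) (h2 : ∀ e ∈ L2, pos ≤ e) :
    ∀ k0, k0 ≤ L1.length → pvAdvance (L1 ++ L2) pos k0 = L1.length := by
  have key : ∀ m k0, L1.length - k0 = m → k0 ≤ L1.length →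
      pvAdvance (L1 ++ L2) pos k0 = L1.length := by
    intro m
    induction m with
    | zero =>
      intro k0 hm hk
      have hk0 : k0 = L1.length := by omega
      subst hk0
      rw [pvAdvance]
      split_ifs with h hlt
      · exfalso
        have hL2 : L1.length - L1.length < L2.length := by simp at h; omega
        rw [List.getElem_append_right (le_refl _)] at hlt
        have : pos ≤ L2[L1.length - L1.length] := h2 _ (List.getElem_mem _)
        omega
      · rfl
      · rfl
    | succ m ih =>
      intro k0 hm hk
      have hlt : k0 < L1.length := by omega
      rw [pvAdvance]
      have hkl : k0 < (L1 ++ L2).length := by simp; omega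
      rw [dif_pos hkl, List.getElem_append_left hlt,
          if_pos (h1 _ (List.getElem_mem _))]
      exact ih (k0 + 1) (by omega) (by omega)
  exact fun k0 hk => key (L1.length - k0) k0 rfl hk

-- the loop invariant: every occurrence strictly before a value's cursor is < pos
def pvInv (longer : List Int) (cur : PySem.Dict Int Int) (p : Nat) : Prop :=
  ∀ w : Int, 0 ≤ cur.getD w 0 ∧ (cur.getD w 0).toNat ≤ (pvOccFrom w longer 0).length ∧
    ∀ j (hj : j < (pvOccFrom w longer 0).length), j < (cur.getD w 0).toNat →
      (pvOccFrom w longer 0)[j] < (p : Int)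

theorem pvBLoop_eq_pvBGo (longer : List Int) (vs : List Int)
    (cur : PySem.Dict Int Int) (p : Nat) (out : List Int)
    (hinv : pvInv longer cur p) :
    pvBLoop (pvBuildOcc (PySem.List.enumerate longer 0) PySem.Dict.empty) vs cur (p : Int) out
      = out ++ pvBGo longer vs p := by
  induction vs generalizing cur p out with
  | nil => simp [pvBLoop, pvBGo]
  | cons v vs ih =>
    have hocc : (pvBuildOcc (PySem.List.enumerate longer 0) PySem.Dict.empty).getD v []
        = pvOccFrom v longer 0 := by
      rw [pvBuildOcc_getD]; simp
    set L1 := pvOccFrom v (longer.take p) 0 with hL1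
    set L2 := pvOccFrom v (longer.drop p) (0 + (p : Int)) with hL2
    have hsplit : pvOccFrom v longer 0 = L1 ++ L2 := pvOccFrom_split v longer 0 p
    have hlen2 : (pvOccFrom v longer 0).length = L1.length + L2.length := by
      rw [hsplit]; simp
    have h1 : ∀ e ∈ L1, e < (p : Int) := by
      intro e he
      have := pvOccFrom_bounds v (longer.take p) 0 e he
      have hlen : (longer.take p).length ≤ p := by simp
      push_cast at this ⊢
      omega
    have h2 : ∀ e ∈ L2, (p : Int) ≤ e := by
      intro e he
      have := pvOccFrom_bounds v (longer.drop p) (0 + (p : Int)) e he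
      omega
    obtain ⟨hnn, hle, hpre⟩ := hinv v
    have hk0 : (cur.getD v 0).toNat ≤ L1.length := by
      by_contra hgt
      have hL1lt : L1.length < (pvOccFrom v longer 0).length := by omega
      have hlstget := hpre L1.length hL1lt (by omega)
      rw [List.getElem_of_eq hsplit hL1lt,
          List.getElem_append_right (le_refl _)] at hlstget
      exact absurd hlstget (not_lt.mpr (h2 _ (List.getElem_mem _)))
    have hadv : pvAdvance (pvOccFrom v longer 0) (p : Int) (cur.getD v 0).toNat
        = L1.length := by
      rw [hsplit]
      exact pvAdvance_split L1 L2 (p : Int) h1 h2 _ hk0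
    rw [pvBLoop]
    simp only [hocc]
    cases hidx : PySem.List.index? (longer.drop p) v with
    | none =>
      have hL2nil : L2 = [] := by
        rw [hL2]
        exact pvOccFrom_nil_of_not_mem v _ _ ((PySem.List.index?_eq_none_iff _ _).mp hidx)
      have hL20 : L2.length = 0 := by rw [hL2nil]; rfl
      rw [dif_neg (by rw [hadv]; omega)]
      simp only [pvBGo, hidx, List.append_nil]
    | some k =>
      have hhead : L2.head? = some ((p : Int) + k) := by
        rw [hL2, pvOccFrom_head?, hidx]
        simp
      obtain ⟨L2', hL2'⟩ : ∃ t, L2 = ((p : Int) + k) :: t := by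
        cases hc : L2 with
        | nil => rw [hc] at hhead; simp at hhead
        | cons a t =>
          rw [hc] at hhead
          simp at hhead
          exact ⟨t, by rw [hhead]⟩
      have hL2len : 0 < L2.length := by rw [hL2']; simp
      have hrlt : pvAdvance (pvOccFrom v longer 0) (p : Int) (cur.getD v 0).toNat
          < (pvOccFrom v longer 0).length := by rw [hadv]; omega
      have hL1lt : L1.length < (pvOccFrom v longer 0).length := by omega
      have hget : (pvOccFrom v longer 0)[pvAdvance (pvOccFrom v longer 0) (p : Int)
          (cur.getD v 0).toNat]'hrlt = (p : Int) + k := by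
        rw [getElem_congr rfl hadv hrlt, List.getElem_of_eq hsplit hL1lt,
            List.getElem_append_right (le_refl _)]
        simp [hL2']
      rw [dif_pos hrlt, hget]
      have hinv' : pvInv longer
          (cur.insert v ((pvAdvance (pvOccFrom v longer 0) (p : Int)
            (cur.getD v 0).toNat : Int) + 1)) (p + k + 1) := by
        intro w
        rw [PySem.Dict.getD_insert]
        by_cases hw : w = v
        · rw [if_pos hw, hw, hadv]
          have htn : ((L1.length : Int) + 1).toNat = L1.length + 1 := by omega
          refine ⟨by positivity, by rw [htn]; omega, ?_⟩
          intro j hj hjlt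
          rw [htn] at hjlt
          by_cases hjr : j < L1.length
          · have hmem : (pvOccFrom v longer 0)[j]'hj ∈ L1 := by
              rw [List.getElem_of_eq hsplit hj, List.getElem_append_left hjr]
              exact List.getElem_mem _
            have := h1 _ hmem
            push_cast
            omega
          · have hje : j = L1.length := by omega
            have : (pvOccFrom v longer 0)[j]'hj = (p : Int) + k := by
              rw [getElem_congr rfl hje hj, List.getElem_of_eq hsplit hL1lt,
                  List.getElem_append_right (le_refl _)]
              simp [hL2']
            rw [this]
            push_cast
            omega
        · rw [if_neg hw]
          obtain ⟨a, b, c⟩ := hinv w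
          refine ⟨a, b, fun j hj hjlt => ?_⟩
          have := c j hj hjlt
          push_cast at this ⊢
          omega
      have hih := ih (cur.insert v ((pvAdvance (pvOccFrom v longer 0) (p : Int)
        (cur.getD v 0).toNat : Int) + 1)) (p + k + 1) (out ++ [(p : Int) + k]) hinv'
      rw [show ((p : Int) + k + 1) = ((p + k + 1 : Nat) : Int) by push_cast; ring]
      rw [hih]
      simp only [pvBGo, hidx, List.append_assoc, List.singleton_append]
      rw [show (((p + k : Nat) : Int)) = ((p : Int) + (k : Int)) by push_cast; ring]

-- ===== VERDICT (by name: the statement is the Claim_ definition above) =====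
theorem subsequence_indices_py_spec : Claim_equal_subsequence_indices_py := by
  intro longer shorter _ hpre
  obtain ⟨l, hg⟩ := pvG_total longer shorter hpre 0
  have hA := pvAGo_of_pvG shorter longer 0 [] 0 l (Nat.zero_le _) (by simpa using hg)
  have hB := pvBGo_of_pvG longer shorter 0 l (by simpa using hg)
  have hinit : pvInv longer
      (pvFromKeys (pvBuildOcc (PySem.List.enumerate longer 0) PySem.Dict.empty).keys
        PySem.Dict.empty) 0 := by
    intro w
    rw [pvFromKeys_getD _ _ (fun w' => by simp) w]
    exact ⟨le_refl _, by simp, fun j hj hjlt => by omega⟩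
  have hBport : subsequence_indices_py_alt longer shorter = pvBGo longer shorter 0 := by
    unfold subsequence_indices_py_alt
    have := pvBLoop_eq_pvBGo longer shorter _ 0 [] hinit
    simpa using this
  unfold Spec_subsequence_indices_py subsequence_indices_py
  rw [hBport, hB, hA]
  simp
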